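-- pv_equiv track=rewrite | github.com/eeeeeeeelias/nlp-rake | src/nlp_rake/rake.py | get_cooccurrence_graph
-- ===== SOURCE A (Python) =====
-- from typing import Dict, List, Set, Tuple
--
-- def get_cooccurrence_graph(phrases: List[str]) -> Dict[str, Dict[str, int]]:
--     """
--     Get graph that stores cooccurence of tokens in phrases.
--
--     Matrix is stored as dict,
--     where key is token, value is dict (key is second token, value is number of cooccurrence).
--
--     Example:
--     get_occurrence_graph(["Mary", "John", "some words", "other words"]) -> {
--         'mary': {'mary': 1},
--         'john': {'john': 1},
--         'some': {'some': 1, 'words': 1},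
--         'words': {'some': 1, 'words': 2, 'other': 1},
--         'other': {'other': 1, 'words': 1}
--     }
--     """
--     graph: Dict[str, Dict[str, int]] = {}
--     for phrase in phrases:
--         for first_token in phrase.lower().split():
--             for second_token in phrase.lower().split():
--                 if first_token not in graph:
--                     graph[first_token] = {}
--                 graph[first_token][second_token] = graph[first_token].get(second_token, 0) + 1
--     return graph
-- ===== SOURCE B (Python) =====
-- def get_cooccurrence_graph(phrases):
--     # Stage 1: one flat tally keyed by (first, second) token pairs;
--     # per phrase, count tokens once and add count[first]*count[second] per distinct pair.
--     pair_counts = {}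
--     for phrase in phrases:
--         counts = {}
--         for token in phrase.lower().split():
--             counts[token] = counts.get(token, 0) + 1
--         for first, c1 in counts.items():
--             for second, c2 in counts.items():
--                 key = (first, second)
--                 pair_counts[key] = pair_counts.get(key, 0) + c1 * c2
--     # Stage 2: group the flat tally into the nested dict shape.
--     graph = {}
--     for (first, second), total in pair_counts.items():
--         graph.setdefault(first, {})[second] = total
--     return graph
-- ===== Notes on version B (the rewrite author's own statement) =====
-- stated objective: alternative
-- what changed: B is a two-stage algorithm over a different data structure: it first accumulates one flat tally keyed by (first, second) token pairs, adding count_first*count_second per distinct pair from a per-phrase frequency table (instead of A's +1 per position pair into a nested dict built on the fly), and then in a separate pass groups the flat pair tally into the nested dict shape.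
import Mathlib
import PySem

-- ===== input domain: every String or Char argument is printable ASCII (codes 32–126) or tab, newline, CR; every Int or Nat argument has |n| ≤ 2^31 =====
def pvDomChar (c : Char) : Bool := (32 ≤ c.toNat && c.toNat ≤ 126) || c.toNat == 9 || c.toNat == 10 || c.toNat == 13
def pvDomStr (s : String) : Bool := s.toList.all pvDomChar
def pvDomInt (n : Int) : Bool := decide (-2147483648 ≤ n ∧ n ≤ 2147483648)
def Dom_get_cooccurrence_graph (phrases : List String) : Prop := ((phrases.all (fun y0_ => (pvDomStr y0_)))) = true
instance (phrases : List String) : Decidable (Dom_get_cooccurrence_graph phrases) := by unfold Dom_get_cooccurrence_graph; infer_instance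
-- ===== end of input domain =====

-- B re-implements A as a two-stage algorithm: one flat tally keyed by (first, second) token pairs (count-product updates per distinct pair) and a separate grouping pass into the nested dict; objective: alternative algorithm, return value proved equal.


-- ===== PORT A =====
def get_cooccurrence_graph (phrases : List String) : List (String × List (String × Int)) :=
  (phrases.foldl (fun graph phrase =>
      (PySem.Str.split₀ (PySem.Str.lower phrase)).foldl (fun graph first_token =>
        (PySem.Str.split₀ (PySem.Str.lower phrase)).foldl (fun graph second_token =>
          let graph1 := if graph.contains first_token then graph
                        else graph.insert first_token PySem.Dict.empty
          let row := graph1.getD first_token PySem.Dict.empty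
          graph1.insert first_token (row.insert second_token (row.getD second_token 0 + 1)))
          graph)
        graph)
    PySem.Dict.empty).items.map (fun p => (p.1, p.2.items))

-- ===== PORT B =====
def get_cooccurrence_graph_alt (phrases : List String) : List (String × List (String × Int)) :=
  -- Stage 1: flat tally keyed by (first, second) pairs; per phrase a counter, then count-product bumps.
  let pair_counts := phrases.foldl (fun pd phrase =>
      let counts := (PySem.Str.split₀ (PySem.Str.lower phrase)).foldl
        (fun d token => d.insert token (d.getD token 0 + 1)) PySem.Dict.empty
      counts.items.foldl (fun pd p =>
        counts.items.foldl (fun pd q =>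
          pd.insert (p.1, q.1) (pd.getD (p.1, q.1) 0 + p.2 * q.2)) pd) pd)
    (PySem.Dict.empty : PySem.Dict (String × String) Int)
  -- Stage 2: group the flat tally into the nested dict shape.
  (pair_counts.items.foldl (fun graph e =>
      let graph1 := graph.setdefault e.1.1 PySem.Dict.empty
      graph1.insert e.1.1 ((graph1.getD e.1.1 PySem.Dict.empty).insert e.1.2 e.2))
    (PySem.Dict.empty : PySem.Dict String (PySem.Dict String Int))).items.map (fun p => (p.1, p.2.items))

-- ===== PRECONDITION & SPEC =====
def Spec_get_cooccurrence_graph (phrases : List String) (out : List (String × List (String × Int))) : Prop := out = get_cooccurrence_graph_alt phrases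
instance (phrases : List String) (out : List (String × List (String × Int))) : Decidable (Spec_get_cooccurrence_graph phrases out) := by unfold Spec_get_cooccurrence_graph; infer_instance

-- ===== CLAIM (what is proved, stated in full; the proofs are below) =====
def Claim_equal_get_cooccurrence_graph : Prop := ∀ (phrases : List String), Dom_get_cooccurrence_graph phrases → Spec_get_cooccurrence_graph phrases (get_cooccurrence_graph phrases)

-- ===== LEMMAS AND PROOFS =====

-- A's "if token not in graph: graph[token] = {}" is exactly dict.setdefault.
theorem pv_if_eq_setdefault {κ ν : Type} [BEq κ] (g : PySem.Dict κ ν) (i : κ) (v : ν) :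
    (if g.contains i = true then g else g.insert i v) = g.setdefault i v := by
  by_cases h : g.contains i = true
  · rw [if_pos h, PySem.Dict.setdefault_of_contains _ _ h]
  · rw [if_neg h, PySem.Dict.setdefault_of_not_contains _ _ (by simpa using h)]

-- Inserting at an already-present key commutes with an insert at a different key (insertion order unaffected).
theorem pv_insert_comm_of_contains {κ ν : Type} [BEq κ] [LawfulBEq κ]
    (d : PySem.Dict κ ν) (a b : κ) (v w : ν) (hc : d.contains a = true) (hne : a ≠ b) :
    (d.insert b w).insert a v = (d.insert a v).insert b w := by
  have hca : (d.insert b w).contains a = true := by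
    rw [PySem.Dict.contains_insert]; simp [hc]
  apply PySem.Dict.ext
  rw [PySem.Dict.items_insert_of_contains _ _ hca]
  by_cases hb : d.contains b = true
  · have hcb : (d.insert a v).contains b = true := by
      rw [PySem.Dict.contains_insert]; simp [hb]
    rw [PySem.Dict.items_insert_of_contains _ _ hb,
        PySem.Dict.items_insert_of_contains _ _ hcb,
        PySem.Dict.items_insert_of_contains _ _ hc,
        List.map_map, List.map_map]
    apply List.map_congr_left
    intro p _
    simp only [Function.comp_apply]
    by_cases hpa : p.1 = a
    · have hpb : ¬ p.1 = b := fun h => hne (hpa.symm.trans h)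
      simp [hpa, hne]
    · by_cases hpb : p.1 = b
      · simp [hpb, Ne.symm hne]
      · simp [hpa, hpb]
  · have hb' : d.contains b = false := by simpa using hb
    have hcb : (d.insert a v).contains b = false := by
      rw [PySem.Dict.contains_insert]; simp [hb', Ne.symm hne]
    rw [PySem.Dict.items_insert_of_not_contains _ _ hb',
        PySem.Dict.items_insert_of_not_contains _ _ hcb,
        PySem.Dict.items_insert_of_contains _ _ hc,
        List.map_append]
    simp [Ne.symm hne]

-- Abstract per-key weighted updates: commuting an update at a present key past updates at other keys.
theorem pv_fold_comm {S K : Type} [DecidableEq K] (op : K → Int → S → S) (mem : K → S → Prop)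
    (H2 : ∀ a b k k' s, a ≠ b → mem a s → op a k (op b k' s) = op b k' (op a k s))
    (H4 : ∀ a b k s, mem a s → mem a (op b k s)) :
    ∀ (L : List K) (w : K → Int) (s : S) (a : K) (k : Int), mem a s → (∀ x ∈ L, x ≠ a) →
      L.foldl (fun s j => op j (w j) s) (op a k s) = op a k (L.foldl (fun s j => op j (w j) s) s) := by
  intro L
  induction L with
  | nil => intro w s a k _ _; rfl
  | cons x L ih =>
    intro w s a k hmem hx
    have hxa : a ≠ x := fun h => (hx x (by simp)) h.symm
    simp only [List.foldl_cons]
    rw [← H2 a x k (w x) s hxa hmem]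
    exact ih w (op x (w x) s) a k (H4 a x (w x) s hmem) (fun y hy => hx y (by simp [hy]))

-- Two weighted passes over the same duplicate-free key list compose additively.
theorem pv_fold_comp {S K : Type} [DecidableEq K] (op : K → Int → S → S) (mem : K → S → Prop)
    (H1 : ∀ a k1 k2 s, op a k1 (op a k2 s) = op a (k1 + k2) s)
    (H2 : ∀ a b k k' s, a ≠ b → mem a s → op a k (op b k' s) = op b k' (op a k s))
    (H3 : ∀ a k s, mem a (op a k s))
    (H4 : ∀ a b k s, mem a s → mem a (op b k s)) :
    ∀ (L : List K) (w1 w2 : K → Int) (s : S), L.Nodup →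
      L.foldl (fun s j => op j (w1 j) s) (L.foldl (fun s j => op j (w2 j) s) s)
        = L.foldl (fun s j => op j (w1 j + w2 j) s) s := by
  intro L
  induction L with
  | nil => intro w1 w2 s _; rfl
  | cons j L ih =>
    intro w1 w2 s hnd
    have hnd' : L.Nodup := (List.nodup_cons.mp hnd).2
    have hjL : ∀ x ∈ L, x ≠ j := fun x hx h => (List.nodup_cons.mp hnd).1 (h ▸ hx)
    simp only [List.foldl_cons]
    rw [← pv_fold_comm op mem H2 H4 L w2 (op j (w2 j) s) j (w1 j) (H3 j (w2 j) s) hjL]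
    rw [H1 j (w1 j) (w2 j) s]
    exact ih w1 w2 (op j (w1 j + w2 j) s) hnd'

-- Core: a position-by-position pass (weight 1 each) equals one pass over distinct keys weighted by counts.
theorem pv_fold_main {S K : Type} [DecidableEq K] (op : K → Int → S → S) (mem : K → S → Prop)
    (H1 : ∀ a k1 k2 s, op a k1 (op a k2 s) = op a (k1 + k2) s)
    (H2 : ∀ a b k k' s, a ≠ b → mem a s → op a k (op b k' s) = op b k' (op a k s))
    (H3 : ∀ a k s, mem a (op a k s))
    (H4 : ∀ a b k s, mem a s → mem a (op b k s)) :
    ∀ (l : List K) (s : S),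
      l.foldl (fun s i => op i 1 s) s
        = (PySem.Set.ofList l).foldl (fun s j => op j (l.count j : Int) s) s := by
  intro l
  induction l with
  | nil => intro s; rfl
  | cons i t ih =>
    intro s
    simp only [List.foldl_cons]
    rw [ih (op i 1 s), PySem.Set.ofList_cons]
    simp only [List.foldl_cons]
    by_cases hit : i ∈ t
    · obtain ⟨u, v, huv⟩ := List.append_of_mem ((PySem.Set.mem_ofList t i).mpr hit)
      have hnd := PySem.Set.nodup_ofList t
      rw [huv] at hnd
      have hiu : i ∉ u := by
        intro h
        rcases List.nodup_append.mp hnd with ⟨_, _, hdisj⟩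
        exact hdisj i h i (by simp) rfl
      have hiv : i ∉ v := by
        have h2 : (i :: v).Nodup := (List.nodup_append.mp hnd).2.1
        exact (List.nodup_cons.mp h2).1
      have hdis : PySem.Set.discard (u ++ i :: v) i = u ++ v := by
        simp only [PySem.Set.discard, List.filter_append, List.filter_cons]
        rw [List.filter_eq_self.mpr (by intro x hx; simpa using fun (h : x = i) => hiu (h ▸ hx)),
            List.filter_eq_self.mpr (by intro x hx; simpa using fun (h : x = i) => hiv (h ▸ hx))]
        simp
      rw [huv, hdis]
      rw [PySem.List.foldl_congr_mem (u ++ v)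
            (fun s j => op j (((i :: t).count j : Int)) s)
            (fun s j => op j ((t.count j : Int)) s) _
            (by
              intro acc x hx
              have hxi : x ≠ i := by
                rintro rfl
                rcases List.mem_append.mp hx with h | h
                · exact hiu h
                · exact hiv h
              simp [Ne.symm hxi])]
      rw [show (((i :: t).count i : Int)) = (t.count i : Int) + 1 by simp]
      rw [← H1 i (t.count i : Int) 1 s]
      rw [List.foldl_append, List.foldl_append, List.foldl_cons]
      rw [pv_fold_comm op mem H2 H4 u (fun j => (t.count j : Int)) (op i 1 s) i (t.count i : Int)
            (H3 i 1 s) (fun x hx h => hiu (h ▸ hx))]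
    · have hdis : PySem.Set.discard (PySem.Set.ofList t) i = PySem.Set.ofList t := by
        simp only [PySem.Set.discard]
        apply List.filter_eq_self.mpr
        intro x hx
        have hxt : x ∈ t := (PySem.Set.mem_ofList t x).mp hx
        simpa using fun (h : x = i) => hit (h ▸ hxt)
      rw [hdis]
      rw [PySem.List.foldl_congr_mem (PySem.Set.ofList t)
            (fun s j => op j (((i :: t).count j : Int)) s)
            (fun s j => op j ((t.count j : Int)) s) _
            (by
              intro acc x hx
              have hxt : x ∈ t := (PySem.Set.mem_ofList t x).mp hx
              have hxi : x ≠ i := fun h => hit (h ▸ hxt)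
              simp [Ne.symm hxi])]
      rw [show (((i :: t).count i : Int)) = 1 by
            simp [List.count_eq_zero_of_not_mem hit]]

-- ---------- flat pair-tally level ----------

-- pd[key] = pd.get(key, 0) + k, on the flat pair dict.
def pvBump (key : String × String) (k : Int) (pd : PySem.Dict (String × String) Int) :
    PySem.Dict (String × String) Int :=
  pd.insert key (pd.getD key 0 + k)

theorem pvBump_comb (key : String × String) (k1 k2 : Int) (pd : PySem.Dict (String × String) Int) :
    pvBump key k1 (pvBump key k2 pd) = pvBump key (k1 + k2) pd := by
  simp only [pvBump]
  rw [PySem.Dict.getD_insert_self, PySem.Dict.insert_insert_self]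
  congr 1
  ring

theorem pvBump_comm (key key' : String × String) (k k' : Int)
    (pd : PySem.Dict (String × String) Int) (hne : key ≠ key') (hc : pd.contains key = true) :
    pvBump key k (pvBump key' k' pd) = pvBump key' k' (pvBump key k pd) := by
  simp only [pvBump]
  rw [PySem.Dict.getD_insert_of_ne _ _ _ hne, PySem.Dict.getD_insert_of_ne _ _ _ (Ne.symm hne)]
  exact pv_insert_comm_of_contains pd key key' _ _ hc hne

theorem pvBump_contains_self (key : String × String) (k : Int)
    (pd : PySem.Dict (String × String) Int) : (pvBump key k pd).contains key = true := by
  simp only [pvBump]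
  exact PySem.Dict.contains_insert_self _ _ _

theorem pvBump_mono (key key' : String × String) (k : Int)
    (pd : PySem.Dict (String × String) Int) (h : pd.contains key = true) :
    (pvBump key' k pd).contains key = true := by
  simp only [pvBump]
  rw [PySem.Dict.contains_insert]
  simp [h]

-- A key already present survives any loop of bumps.
theorem pv_contains_foldl_bump {α : Type} (L : List α) (kf : α → String × String) (w : α → Int)
    (key : String × String) :
    ∀ (pd : PySem.Dict (String × String) Int), pd.contains key = true →
      (L.foldl (fun pd x => pvBump (kf x) (w x) pd) pd).contains key = true := by
  induction L with
  | nil => intro pd h; exact h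
  | cons x L ih =>
    intro pd h
    simp only [List.foldl_cons]
    exact ih _ (pvBump_mono _ _ _ _ h)

-- A single bump at a present key commutes past a whole row of bumps at other keys.
theorem pv_bump_fold_comm (b : String) (wb : String → Int) (key : String × String) (k : Int) :
    ∀ (L : List String) (pd : PySem.Dict (String × String) Int),
      (∀ j ∈ L, (b, j) ≠ key) → pd.contains key = true →
      L.foldl (fun pd j => pvBump (b, j) (wb j) pd) (pvBump key k pd)
        = pvBump key k (L.foldl (fun pd j => pvBump (b, j) (wb j) pd) pd) := by
  intro L
  induction L with
  | nil => intro pd _ _; rfl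
  | cons j L ih =>
    intro pd hL hc
    simp only [List.foldl_cons]
    rw [← pvBump_comm key (b, j) k (wb j) pd (Ne.symm (hL j (by simp))) hc]
    exact ih _ (fun j' hj' => hL j' (by simp [hj'])) (pvBump_mono _ _ _ _ hc)

-- Two whole rows of bumps at distinct first components commute.
theorem pv_comm2 (a b : String) (wa wb : String → Int) (N : List String) (hab : a ≠ b) :
    ∀ (M : List String) (pd : PySem.Dict (String × String) Int),
      (∀ j ∈ M, pd.contains (a, j) = true) →
      M.foldl (fun pd j => pvBump (a, j) (wa j) pd)
          (N.foldl (fun pd j => pvBump (b, j) (wb j) pd) pd)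
        = N.foldl (fun pd j => pvBump (b, j) (wb j) pd)
            (M.foldl (fun pd j => pvBump (a, j) (wa j) pd) pd) := by
  intro M
  induction M with
  | nil => intro pd _; rfl
  | cons j M ih =>
    intro pd hM
    simp only [List.foldl_cons]
    rw [← pv_bump_fold_comm b wb (a, j) (wa j) N pd
          (fun j' _ h => hab (congrArg Prod.fst h).symm) (hM j (by simp))]
    exact ih _ (fun j' hj' => pvBump_mono _ _ _ _ (hM j' (by simp [hj'])))

-- Every pair of a row is present after the row's loop of bumps.
theorem pv_contains_row (a : String) (w : String → Int) :
    ∀ (L : List String) (pd : PySem.Dict (String × String) Int) (j0 : String), j0 ∈ L →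
      (L.foldl (fun pd j => pvBump (a, j) (w j) pd) pd).contains (a, j0) = true := by
  intro L
  induction L with
  | nil => intro pd j0 h; cases h
  | cons j L ih =>
    intro pd j0 h0
    simp only [List.foldl_cons]
    by_cases hj : j0 ∈ L
    · exact ih _ j0 hj
    · have : j0 = j := by
        rcases List.mem_cons.mp h0 with h | h
        · exact h
        · exact absurd h hj
      subst this
      exact pv_contains_foldl_bump L _ _ _ _ (pvBump_contains_self _ _ _)

-- The whole-row operation: add k * count(j) at (i, j) for every distinct j.
def pvFOp (ts : List String) (i : String) (k : Int) (pd : PySem.Dict (String × String) Int) :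
    PySem.Dict (String × String) Int :=
  (PySem.Set.ofList ts).foldl (fun pd j => pvBump (i, j) (k * (ts.count j : Int)) pd) pd

theorem pvFOp_H1 (ts : List String) : ∀ (a : String) (k1 k2 : Int)
    (pd : PySem.Dict (String × String) Int),
    pvFOp ts a k1 (pvFOp ts a k2 pd) = pvFOp ts a (k1 + k2) pd := by
  intro a k1 k2 pd
  simp only [pvFOp]
  rw [pv_fold_comp (fun j k pd => pvBump (a, j) k pd) (fun j pd => pd.contains (a, j) = true)
        (fun x k1 k2 pd => pvBump_comb (a, x) k1 k2 pd)
        (fun x y k k' pd hne hc =>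
          pvBump_comm (a, x) (a, y) k k' pd (fun h => hne (congrArg Prod.snd h)) hc)
        (fun x k pd => pvBump_contains_self (a, x) k pd)
        (fun x y k pd h => pvBump_mono (a, x) (a, y) k pd h)
        (PySem.Set.ofList ts) (fun j => k1 * (ts.count j : Int)) (fun j => k2 * (ts.count j : Int))
        pd (PySem.Set.nodup_ofList ts)]
  apply PySem.List.foldl_congr_mem
  intro acc x _
  simp only [pvBump]
  congr 1
  ring

def pvMemRow (ts : List String) (a : String) (pd : PySem.Dict (String × String) Int) : Prop :=
  ((PySem.Set.ofList ts).all (fun j => pd.contains (a, j))) = true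

theorem pvFOp_H2 (ts : List String) : ∀ (a b : String) (k k' : Int)
    (pd : PySem.Dict (String × String) Int), a ≠ b → pvMemRow ts a pd →
    pvFOp ts a k (pvFOp ts b k' pd) = pvFOp ts b k' (pvFOp ts a k pd) := by
  intro a b k k' pd hab hmem
  simp only [pvFOp]
  exact pv_comm2 a b _ _ _ hab (PySem.Set.ofList ts) pd
    (fun j hj => by
      have := List.all_eq_true.mp hmem j hj
      simpa using this)

theorem pvFOp_H3 (ts : List String) : ∀ (a : String) (k : Int)
    (pd : PySem.Dict (String × String) Int), pvMemRow ts a (pvFOp ts a k pd) := by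
  intro a k pd
  simp only [pvMemRow, pvFOp]
  apply List.all_eq_true.mpr
  intro j hj
  simpa using pv_contains_row a _ (PySem.Set.ofList ts) pd j hj

theorem pvFOp_H4 (ts : List String) : ∀ (a b : String) (k : Int)
    (pd : PySem.Dict (String × String) Int), pvMemRow ts a pd → pvMemRow ts a (pvFOp ts b k pd) := by
  intro a b k pd h
  simp only [pvMemRow, pvFOp]
  apply List.all_eq_true.mpr
  intro j hj
  have hc := List.all_eq_true.mp h j hj
  simpa using pv_contains_foldl_bump (PySem.Set.ofList ts) _ _ (a, j) pd (by simpa using hc)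

-- Per phrase at the flat level: A's positional double pass equals B's counter-product double pass.
theorem pv_flatAB (ts : List String) (pd : PySem.Dict (String × String) Int) :
    ts.foldl (fun pd i => ts.foldl (fun pd j => pvBump (i, j) 1 pd) pd) pd
      = (PySem.Set.ofList ts).foldl (fun pd i =>
          (PySem.Set.ofList ts).foldl (fun pd j =>
            pvBump (i, j) ((ts.count i : Int) * (ts.count j : Int)) pd) pd) pd := by
  have hinner : ∀ (i : String) (pd : PySem.Dict (String × String) Int),
      ts.foldl (fun pd j => pvBump (i, j) 1 pd) pd = pvFOp ts i 1 pd := by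
    intro i pd
    rw [pv_fold_main (fun j k pd => pvBump (i, j) k pd) (fun j pd => pd.contains (i, j) = true)
          (fun x k1 k2 pd => pvBump_comb (i, x) k1 k2 pd)
          (fun x y k k' pd hne hc =>
            pvBump_comm (i, x) (i, y) k k' pd (fun h => hne (congrArg Prod.snd h)) hc)
          (fun x k pd => pvBump_contains_self (i, x) k pd)
          (fun x y k pd h => pvBump_mono (i, x) (i, y) k pd h) ts pd]
    simp only [pvFOp]
    apply PySem.List.foldl_congr_mem
    intro acc x _
    simp [one_mul]
  rw [PySem.List.foldl_congr_mem ts _ (fun pd i => pvFOp ts i 1 pd) pd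
        (fun acc i _ => hinner i acc)]
  rw [pv_fold_main (fun i k pd => pvFOp ts i k pd) (pvMemRow ts)
        (pvFOp_H1 ts) (pvFOp_H2 ts) (pvFOp_H3 ts) (pvFOp_H4 ts) ts pd]
  rfl

-- ---------- nested level and the assembly homomorphism ----------

-- Updating a whole row of the nested graph through setdefault.
def pvUpd (i : String) (F : PySem.Dict String Int → PySem.Dict String Int)
    (g : PySem.Dict String (PySem.Dict String Int)) : PySem.Dict String (PySem.Dict String Int) :=
  (g.setdefault i PySem.Dict.empty).insert i
    (F ((g.setdefault i PySem.Dict.empty).getD i PySem.Dict.empty))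

-- The row-level operation r[j] = r.get(j, 0) + v.
def pvOpI (j : String) (v : Int) (r : PySem.Dict String Int) : PySem.Dict String Int :=
  r.insert j (r.getD j 0 + v)

theorem pvUpd_comp (a : String) (F G : PySem.Dict String Int → PySem.Dict String Int)
    (g : PySem.Dict String (PySem.Dict String Int)) :
    pvUpd a F (pvUpd a G g) = pvUpd a (fun r => F (G r)) g := by
  simp only [pvUpd]
  rw [PySem.Dict.setdefault_of_contains _ _ (PySem.Dict.contains_insert_self _ _ _)]
  rw [PySem.Dict.getD_insert_self, PySem.Dict.insert_insert_self]

theorem pvUpd_comm (a b : String) (F G : PySem.Dict String Int → PySem.Dict String Int)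
    (g : PySem.Dict String (PySem.Dict String Int)) (hne : a ≠ b) (hc : g.contains a = true) :
    pvUpd a F (pvUpd b G g) = pvUpd b G (pvUpd a F g) := by
  simp only [pvUpd]
  rw [PySem.Dict.setdefault_of_contains _ _ hc]
  by_cases hb : g.contains b = true
  · rw [PySem.Dict.setdefault_of_contains _ _ hb]
    have h1 : (g.insert b (G (g.getD b PySem.Dict.empty))).contains a = true := by
      rw [PySem.Dict.contains_insert]; simp [hc]
    rw [PySem.Dict.setdefault_of_contains _ _ h1]
    have h2 : (g.insert a (F (g.getD a PySem.Dict.empty))).contains b = true := by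
      rw [PySem.Dict.contains_insert]; simp [hb]
    rw [PySem.Dict.setdefault_of_contains _ _ h2]
    rw [PySem.Dict.getD_insert_of_ne _ _ _ hne, PySem.Dict.getD_insert_of_ne _ _ _ (Ne.symm hne)]
    exact pv_insert_comm_of_contains g a b _ _ hc hne
  · have hb' : g.contains b = false := by simpa using hb
    rw [PySem.Dict.setdefault_of_not_contains _ _ hb']
    rw [PySem.Dict.getD_insert_self, PySem.Dict.insert_insert_self]
    have h1 : (g.insert b (G PySem.Dict.empty)).contains a = true := by
      rw [PySem.Dict.contains_insert]; simp [hc]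
    rw [PySem.Dict.setdefault_of_contains _ _ h1]
    rw [PySem.Dict.getD_insert_of_ne _ _ _ hne]
    have h2 : (g.insert a (F (g.getD a PySem.Dict.empty))).contains b = false := by
      rw [PySem.Dict.contains_insert]; simp [hb', Ne.symm hne]
    rw [PySem.Dict.setdefault_of_not_contains _ _ h2]
    rw [PySem.Dict.getD_insert_self, PySem.Dict.insert_insert_self]
    exact pv_insert_comm_of_contains g a b _ _ hc hne

theorem pvUpd_congr (i : String) (F G : PySem.Dict String Int → PySem.Dict String Int)
    (g : PySem.Dict String (PySem.Dict String Int))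
    (h : F ((g.setdefault i PySem.Dict.empty).getD i PySem.Dict.empty)
       = G ((g.setdefault i PySem.Dict.empty).getD i PySem.Dict.empty)) :
    pvUpd i F g = pvUpd i G g := by
  simp only [pvUpd, h]

-- One step of A's inner loop is a row update.
theorem pv_stepA (i j : String) (g : PySem.Dict String (PySem.Dict String Int)) :
    (let graph1 := if g.contains i = true then g else g.insert i PySem.Dict.empty
     let row := graph1.getD i PySem.Dict.empty
     graph1.insert i (row.insert j (row.getD j 0 + 1)))
      = pvUpd i (fun r => pvOpI j 1 r) g := by
  simp only [pvUpd, pvOpI]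
  rw [pv_if_eq_setdefault]

-- The graph update a flat entry ((i, j), v) performs, and B's grouping step.
def pvNStep (key : String × String) (v : Int)
    (g : PySem.Dict String (PySem.Dict String Int)) : PySem.Dict String (PySem.Dict String Int) :=
  pvUpd key.1 (fun r => pvOpI key.2 v r) g

def pvAsmStep (g : PySem.Dict String (PySem.Dict String Int))
    (e : (String × String) × Int) : PySem.Dict String (PySem.Dict String Int) :=
  pvUpd e.1.1 (fun r => r.insert e.1.2 e.2) g

-- Assemble a flat pair dict into the nested shape (B's stage 2).
def pvAsm (pd : PySem.Dict (String × String) Int) : PySem.Dict String (PySem.Dict String Int) :=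
  pd.items.foldl pvAsmStep PySem.Dict.empty

theorem pv_contains_of_row (g : PySem.Dict String (PySem.Dict String Int)) (i j : String)
    (h : ((g.getD i PySem.Dict.empty).contains j) = true) : g.contains i = true := by
  by_contra hc
  have hc' : g.contains i = false := by simpa using hc
  rw [PySem.Dict.getD_of_not_contains _ _ hc'] at h
  simp [PySem.Dict.contains_empty] at h

-- Which row cells one assembly step makes present.
theorem pv_asmStep_row (g : PySem.Dict String (PySem.Dict String Int))
    (e : (String × String) × Int) (i j : String) :
    (((pvAsmStep g e).getD i PySem.Dict.empty).contains j)
      = (((g.getD i PySem.Dict.empty).contains j) || e.1 == (i, j)) := by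
  simp only [pvAsmStep, pvUpd]
  by_cases h1 : e.1.1 = i
  · rw [h1, PySem.Dict.getD_insert_self, PySem.Dict.getD_setdefault_self,
        PySem.Dict.contains_insert]
    apply Bool.eq_iff_iff.mpr
    constructor
    · intro h
      rcases Bool.or_eq_true_iff.mp h with h | h
      · refine Bool.or_eq_true_iff.mpr (Or.inr ?_)
        have : j = e.1.2 := by simpa using h
        have : e.1 = (i, j) := Prod.ext h1 this.symm
        simpa using this
      · exact Bool.or_eq_true_iff.mpr (Or.inl h)
    · intro h
      rcases Bool.or_eq_true_iff.mp h with h | h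
      · exact Bool.or_eq_true_iff.mpr (Or.inr h)
      · have he : e.1 = (i, j) := by simpa using h
        refine Bool.or_eq_true_iff.mpr (Or.inl ?_)
        simp [he]
  · rw [PySem.Dict.getD_insert_of_ne _ _ _ (fun h => h1 h.symm)]
    have hsd : ((g.setdefault e.1.1 PySem.Dict.empty).getD i PySem.Dict.empty)
        = g.getD i PySem.Dict.empty := by
      rw [PySem.Dict.getD_eq_get?_getD, PySem.Dict.get?_setdefault_of_ne _ _ (fun h => h1 h.symm),
          ← PySem.Dict.getD_eq_get?_getD]
    rw [hsd]
    have he : (e.1 == (i, j)) = false := by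
      apply beq_eq_false_iff_ne.mpr
      intro h
      exact h1 (congrArg Prod.fst h)
    simp [he]

-- Row-cell membership after assembling a list of flat entries.
theorem pv_asm_row_contains : ∀ (L : List ((String × String) × Int))
    (g : PySem.Dict String (PySem.Dict String Int)) (i j : String),
    (((L.foldl pvAsmStep g).getD i PySem.Dict.empty).contains j)
      = (((g.getD i PySem.Dict.empty).contains j) || L.any (fun e => e.1 == (i, j))) := by
  intro L
  induction L with
  | nil => intro g i j; simp
  | cons e L ih =>
    intro g i j
    simp only [List.foldl_cons, List.any_cons]
    rw [ih, pv_asmStep_row]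
    cases ((g.getD i PySem.Dict.empty).contains j) <;> cases (e.1 == (i, j)) <;> simp

-- A pending cell update commutes past assembly steps at other flat keys.
theorem pv_step_comm (e : (String × String) × Int) (i j : String) (v : Int)
    (g : PySem.Dict String (PySem.Dict String Int)) (hne : e.1 ≠ (i, j))
    (hrow : ((g.getD i PySem.Dict.empty).contains j) = true) :
    pvAsmStep (pvNStep (i, j) v g) e = pvNStep (i, j) v (pvAsmStep g e) := by
  have hci : g.contains i = true := pv_contains_of_row g i j hrow
  by_cases h1 : e.1.1 = i
  · have h2 : e.1.2 ≠ j := fun h => hne (Prod.ext h1 h)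
    simp only [pvAsmStep, pvNStep, h1]
    rw [pvUpd_comp, pvUpd_comp]
    apply pvUpd_congr
    set r := ((g.setdefault i PySem.Dict.empty).getD i PySem.Dict.empty) with hr
    have hrj : r.contains j = true := by
      rw [hr, PySem.Dict.getD_setdefault_self]
      exact hrow
    show (pvOpI j v r).insert e.1.2 e.2 = pvOpI j v (r.insert e.1.2 e.2)
    simp only [pvOpI]
    rw [PySem.Dict.getD_insert_of_ne _ _ _ (fun h => h2 h.symm)]
    exact (pv_insert_comm_of_contains r j e.1.2 _ _ hrj (fun h => h2 h.symm)).symm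
  · simp only [pvAsmStep, pvNStep]
    exact (pvUpd_comm i e.1.1 _ _ g (fun h => h1 h.symm) hci).symm

theorem pv_commuteL (i j : String) (v : Int) :
    ∀ (L : List ((String × String) × Int)) (g : PySem.Dict String (PySem.Dict String Int)),
      (∀ e ∈ L, e.1 ≠ (i, j)) → ((g.getD i PySem.Dict.empty).contains j) = true →
      L.foldl pvAsmStep (pvNStep (i, j) v g) = pvNStep (i, j) v (L.foldl pvAsmStep g) := by
  intro L
  induction L with
  | nil => intro g _ _; rfl
  | cons e L ih =>
    intro g hL hrow
    simp only [List.foldl_cons]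
    rw [pv_step_comm e i j v g (hL e (by simp)) hrow]
    apply ih _ (fun e' he' => hL e' (by simp [he']))
    rw [pv_asmStep_row, hrow]
    simp

-- CORE: assembling after one flat bump is the corresponding nested update after assembling.
theorem pv_core (pd : PySem.Dict (String × String) Int) (key : String × String) (v : Int)
    (hnd : pd.keys.Nodup) : pvAsm (pvBump key v pd) = pvNStep key v (pvAsm pd) := by
  obtain ⟨i, j⟩ := key
  by_cases hc : pd.contains (i, j) = true
  · -- key present: its items entry's value changes in place
    have hmem : (i, j) ∈ pd.items.map Prod.fst := by
      have := (PySem.Dict.contains_iff_mem_keys _ _).mp hc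
      simpa [PySem.Dict.keys] using this
    obtain ⟨e, he, hek⟩ := List.mem_map.mp hmem
    obtain ⟨L1, L2, hsplit⟩ := List.append_of_mem he
    have hkeys : pd.keys = L1.map Prod.fst ++ e.1 :: L2.map Prod.fst := by
      simp [PySem.Dict.keys, hsplit]
    rw [hkeys] at hnd
    have hnotL1 : ∀ e' ∈ L1, e'.1 ≠ (i, j) := by
      intro e' he' h
      have : e.1 ∈ L1.map Prod.fst := by
        rw [hek, ← h]; exact List.mem_map_of_mem he'
      rcases List.nodup_append.mp hnd with ⟨_, _, hdisj⟩
      exact hdisj e.1 this e.1 (by simp) rfl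
    have hnotL2 : ∀ e' ∈ L2, e'.1 ≠ (i, j) := by
      intro e' he' h
      have h2 : (e.1 :: L2.map Prod.fst).Nodup := (List.nodup_append.mp hnd).2.1
      exact (List.nodup_cons.mp h2).1 (by rw [hek, ← h]; exact List.mem_map_of_mem he')
    have hgetD : pd.getD (i, j) 0 = e.2 := by
      have : ((i, j), e.2) ∈ pd.items := by
        have : e = ((i, j), e.2) := by
          cases e; simp at hek ⊢; exact hek
        rw [← this]; exact he
      exact PySem.Dict.getD_of_mem_items _ this (by rw [hkeys]; exact hnd) 0
    have hitems : (pvBump (i, j) v pd).items = L1 ++ ((i, j), e.2 + v) :: L2 := by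
      simp only [pvBump]
      rw [PySem.Dict.items_insert_of_contains _ _ hc, hsplit]
      rw [List.map_append, List.map_cons]
      congr 1
      · apply (List.map_congr_left ?_).trans (List.map_id L1)
        intro e' he'
        have : (e'.1 == (i, j)) = false := beq_eq_false_iff_ne.mpr (hnotL1 e' he')
        simp [this]
      · congr 1
        · have : (e.1 == (i, j)) = true := by simp [hek]
          simp [this, hgetD]
        · apply (List.map_congr_left ?_).trans (List.map_id L2)
          intro e' he'
          have : (e'.1 == (i, j)) = false := beq_eq_false_iff_ne.mpr (hnotL2 e' he')
          simp [this]
    have hitems0 : pd.items = L1 ++ ((i, j), e.2) :: L2 := by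
      rw [hsplit]
      congr 1
      congr 1
      cases e; simp at hek ⊢; exact hek
    simp only [pvAsm, hitems, hitems0, List.foldl_append, List.foldl_cons]
    set g1 := L1.foldl pvAsmStep (PySem.Dict.empty : PySem.Dict String (PySem.Dict String Int))
      with hg1
    have hrow1 : ((g1.getD i PySem.Dict.empty).contains j) = false := by
      rw [hg1, pv_asm_row_contains]
      have hany : L1.any (fun e' => e'.1 == (i, j)) = false := by
        apply List.any_eq_false.mpr
        intro e' he'
        simpa using hnotL1 e' he'
      simp [hany, PySem.Dict.getD_empty, PySem.Dict.contains_empty]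
    have hstep : pvAsmStep g1 ((i, j), e.2 + v) = pvNStep (i, j) v (pvAsmStep g1 ((i, j), e.2)) := by
      simp only [pvAsmStep, pvNStep]
      rw [pvUpd_comp]
      apply pvUpd_congr
      beta_reduce
      simp only [pvOpI]
      rw [PySem.Dict.getD_insert_self, PySem.Dict.insert_insert_self]
    rw [hstep]
    apply pv_commuteL i j v L2 _ hnotL2
    rw [pv_asmStep_row]
    simp
  · -- key absent: the bump appends a fresh entry
    have hc' : pd.contains (i, j) = false := by simpa using hc
    have hitems : (pvBump (i, j) v pd).items = pd.items ++ [((i, j), pd.getD (i, j) 0 + v)] := by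
      simp only [pvBump]
      exact PySem.Dict.items_insert_of_not_contains _ _ hc'
    have hgetD : pd.getD (i, j) 0 = 0 := PySem.Dict.getD_of_not_contains _ _ hc'
    simp only [pvAsm, hitems, List.foldl_append, List.foldl_cons, List.foldl_nil]
    have hrow : (((pd.items.foldl pvAsmStep PySem.Dict.empty).getD i
        PySem.Dict.empty).contains j) = false := by
      rw [pv_asm_row_contains]
      have hany : pd.items.any (fun e' => e'.1 == (i, j)) = false := by
        apply List.any_eq_false.mpr
        intro e' he' hbeq
        have h : e'.1 = (i, j) := by simpa using hbeq
        have : (i, j) ∈ pd.keys := by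
          simp only [PySem.Dict.keys]
          rw [← h]
          exact List.mem_map_of_mem he'
        rw [(PySem.Dict.contains_iff_mem_keys _ _).mpr this] at hc'
        cases hc'
      simp [hany, PySem.Dict.getD_empty, PySem.Dict.contains_empty]
    simp only [pvAsmStep, pvNStep]
    apply pvUpd_congr
    set r := (((pd.items.foldl pvAsmStep PySem.Dict.empty).setdefault i
        PySem.Dict.empty).getD i PySem.Dict.empty) with hr
    have hrj : r.contains j = false := by
      rw [hr, PySem.Dict.getD_setdefault_self]
      exact hrow
    show r.insert j (pd.getD (i, j) 0 + v) = pvOpI j v r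
    simp only [pvOpI]
    rw [hgetD, PySem.Dict.getD_of_not_contains _ _ hrj]

-- Generic: a map commuting with each fold step commutes with the fold, under an invariant.
theorem pv_foldl_hom_inv {S T α : Type} (h : S → T) (I : S → Prop) (F : S → α → S)
    (G : T → α → T) (hI : ∀ s x, I s → I (F s x)) (hFG : ∀ s x, I s → h (F s x) = G (h s) x) :
    ∀ (L : List α) (s : S), I s → h (L.foldl F s) = L.foldl G (h s) := by
  intro L
  induction L with
  | nil => intro s _; rfl
  | cons x L ih =>
    intro s hs
    simp only [List.foldl_cons]
    rw [ih (F s x) (hI s x hs), hFG s x hs]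

-- Generic invariant preservation through a fold.
theorem pv_foldl_pres {S α : Type} (I : S → Prop) (F : S → α → S)
    (hI : ∀ s x, I s → I (F s x)) :
    ∀ (L : List α) (s : S), I s → I (L.foldl F s) := by
  intro L
  induction L with
  | nil => intro s hs; exact hs
  | cons x L ih => intro s hs; exact ih (F s x) (hI s x hs)

-- Keys of the flat tally stay duplicate-free through one phrase's positional double pass.
theorem pv_nodup_phrase (ts : List String) (pd : PySem.Dict (String × String) Int)
    (h : pd.keys.Nodup) :
    (ts.foldl (fun pd i => ts.foldl (fun pd j => pvBump (i, j) 1 pd) pd) pd).keys.Nodup := by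
  apply pv_foldl_pres (fun pd => pd.keys.Nodup) _ ?_ ts pd h
  intro pd i hpd
  simp only [pvBump]
  exact PySem.Dict.nodup_keys_foldl_insert_key ts (fun j => (i, j))
    (fun pd j => pd.getD (i, j) 0 + 1) pd hpd

-- Assembly commutes with one phrase's positional double pass.
theorem pv_hom_phrase (ts : List String) (pd : PySem.Dict (String × String) Int)
    (h : pd.keys.Nodup) :
    pvAsm (ts.foldl (fun pd i => ts.foldl (fun pd j => pvBump (i, j) 1 pd) pd) pd)
      = ts.foldl (fun g i => ts.foldl (fun g j => pvNStep (i, j) 1 g) g) (pvAsm pd) := by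
  apply pv_foldl_hom_inv pvAsm (fun pd => pd.keys.Nodup) _ _ ?_ ?_ ts pd h
  · intro pd i hpd
    simp only [pvBump]
    exact PySem.Dict.nodup_keys_foldl_insert_key ts (fun j => (i, j))
      (fun pd j => pd.getD (i, j) 0 + 1) pd hpd
  · intro pd i hpd
    apply pv_foldl_hom_inv pvAsm (fun pd => pd.keys.Nodup) _ _ ?_ ?_ ts pd hpd
    · intro pd j hpd
      simp only [pvBump]
      exact PySem.Dict.nodup_keys_insert _ _ _ hpd
    · intro pd j hpd
      exact pv_core pd (i, j) 1 hpd

-- ===== VERDICT (by name: the statement is the Claim_ definition above) =====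
theorem get_cooccurrence_graph_spec : Claim_equal_get_cooccurrence_graph := by
  intro phrases _
  unfold Spec_get_cooccurrence_graph get_cooccurrence_graph get_cooccurrence_graph_alt
  -- B's stage 1, per phrase, is the flat counter-product pass; A's nested loops are nested updates.
  apply congrArg (fun d : PySem.Dict String (PySem.Dict String Int) =>
    d.items.map (fun p => (p.1, p.2.items)))
  -- rewrite A into the nested-update form
  have hA : ∀ (phrase : String) (g : PySem.Dict String (PySem.Dict String Int)),
      (PySem.Str.split₀ (PySem.Str.lower phrase)).foldl (fun graph first_token =>
        (PySem.Str.split₀ (PySem.Str.lower phrase)).foldl (fun graph second_token =>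
          let graph1 := if graph.contains first_token then graph
                        else graph.insert first_token PySem.Dict.empty
          let row := graph1.getD first_token PySem.Dict.empty
          graph1.insert first_token (row.insert second_token (row.getD second_token 0 + 1)))
          graph) g
      = (PySem.Str.split₀ (PySem.Str.lower phrase)).foldl (fun g i =>
          (PySem.Str.split₀ (PySem.Str.lower phrase)).foldl
            (fun g j => pvNStep (i, j) 1 g) g) g := by
    intro phrase g
    apply congrFun
    apply congrFun
    apply congrArg
    funext g i
    apply congrFun
    apply congrFun
    apply congrArg
    funext g j
    exact pv_stepA i j g
  -- rewrite B's stage 1, per phrase, into the flat positional form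
  have hB : ∀ (phrase : String) (pd : PySem.Dict (String × String) Int),
      (let counts := (PySem.Str.split₀ (PySem.Str.lower phrase)).foldl
        (fun d token => d.insert token (d.getD token 0 + 1)) PySem.Dict.empty
       counts.items.foldl (fun pd p =>
        counts.items.foldl (fun pd q =>
          pd.insert (p.1, q.1) (pd.getD (p.1, q.1) 0 + p.2 * q.2)) pd) pd)
      = (PySem.Str.split₀ (PySem.Str.lower phrase)).foldl (fun pd i =>
          (PySem.Str.split₀ (PySem.Str.lower phrase)).foldl
            (fun pd j => pvBump (i, j) 1 pd) pd) pd := by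
    intro phrase pd
    set ts := PySem.Str.split₀ (PySem.Str.lower phrase) with hts
    show (PySem.Dict.counter ts).items.foldl (fun pd p =>
        (PySem.Dict.counter ts).items.foldl (fun pd q =>
          pd.insert (p.1, q.1) (pd.getD (p.1, q.1) 0 + p.2 * q.2)) pd) pd = _
    rw [PySem.Dict.items_counter, List.foldl_map]
    have : ∀ (i : String) (pd : PySem.Dict (String × String) Int),
        ((PySem.Set.ofList ts).map (fun k => (k, (ts.count k : Int)))).foldl
          (fun pd q => pd.insert (i, q.1) (pd.getD (i, q.1) 0 + (ts.count i : Int) * q.2)) pd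
        = (PySem.Set.ofList ts).foldl
            (fun pd j => pvBump (i, j) ((ts.count i : Int) * (ts.count j : Int)) pd) pd := by
      intro i pd
      rw [List.foldl_map]
      rfl
    rw [PySem.List.foldl_congr_mem (PySem.Set.ofList ts) _
          (fun pd i => (PySem.Set.ofList ts).foldl
            (fun pd j => pvBump (i, j) ((ts.count i : Int) * (ts.count j : Int)) pd) pd) pd
          (fun acc i _ => this i acc)]
    exact (pv_flatAB ts pd).symm
  -- chain: B = pvAsm (flat fold) = nested fold = A
  rw [PySem.List.foldl_congr_mem phrases _
        (fun (pd : PySem.Dict (String × String) Int) phrase =>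
          (PySem.Str.split₀ (PySem.Str.lower phrase)).foldl (fun pd i =>
            (PySem.Str.split₀ (PySem.Str.lower phrase)).foldl
              (fun pd j => pvBump (i, j) 1 pd) pd) pd)
        (PySem.Dict.empty) (fun acc p _ => hB p acc)]
  rw [PySem.List.foldl_congr_mem phrases _
        (fun (g : PySem.Dict String (PySem.Dict String Int)) phrase =>
          (PySem.Str.split₀ (PySem.Str.lower phrase)).foldl (fun g i =>
            (PySem.Str.split₀ (PySem.Str.lower phrase)).foldl
              (fun g j => pvNStep (i, j) 1 g) g) g)
        (PySem.Dict.empty) (fun acc p _ => hA p acc)]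
  -- the grouping stage is pvAsm; push it through the phrase folds
  have hfin := pv_foldl_hom_inv pvAsm (fun pd => pd.keys.Nodup)
        (fun pd phrase => (PySem.Str.split₀ (PySem.Str.lower phrase)).foldl (fun pd i =>
          (PySem.Str.split₀ (PySem.Str.lower phrase)).foldl
            (fun pd j => pvBump (i, j) 1 pd) pd) pd)
        (fun g phrase => (PySem.Str.split₀ (PySem.Str.lower phrase)).foldl (fun g i =>
          (PySem.Str.split₀ (PySem.Str.lower phrase)).foldl
            (fun g j => pvNStep (i, j) 1 g) g) g)
        (fun pd phrase hpd => pv_nodup_phrase _ pd hpd)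
        (fun pd phrase hpd => pv_hom_phrase _ pd hpd)
        phrases PySem.Dict.empty PySem.Dict.nodup_keys_empty
  exact hfin.symm
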